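-- pv_equiv track=rewrite | github.com/tnguyen101/CPSC-481-Blackjack-AI | model_building/game_simulations.py | count_cards_in
-- ===== SOURCE A (Python) =====
-- def count_cards_in(dealings):
--
--     running_count = 0
--
--     for card in dealings:
--         if(card < 6 and card > 1):
--             running_count += 1
--         elif(card > 10):
--             running_count -= 1
--
--     return running_count
-- ===== SOURCE B (Python) =====
-- def count_cards_in(dealings):
--     # Build a frequency table first, then score each distinct card value once.
--     counts = {}
--     for card in dealings:
--         counts[card] = counts.get(card, 0) + 1
--     running_count = 0
--     for v, c in counts.items():
--         if 1 < v < 6: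
--             running_count += c
--         elif v > 10:
--             running_count -= c
--     return running_count
-- ===== Notes on version B (the rewrite author's own statement) =====
-- stated objective: alternative
-- what changed: B first builds a frequency table of the dealings and then scores each distinct card value once (adding or subtracting its multiplicity), instead of A's per-card branching loop.
import Mathlib
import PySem

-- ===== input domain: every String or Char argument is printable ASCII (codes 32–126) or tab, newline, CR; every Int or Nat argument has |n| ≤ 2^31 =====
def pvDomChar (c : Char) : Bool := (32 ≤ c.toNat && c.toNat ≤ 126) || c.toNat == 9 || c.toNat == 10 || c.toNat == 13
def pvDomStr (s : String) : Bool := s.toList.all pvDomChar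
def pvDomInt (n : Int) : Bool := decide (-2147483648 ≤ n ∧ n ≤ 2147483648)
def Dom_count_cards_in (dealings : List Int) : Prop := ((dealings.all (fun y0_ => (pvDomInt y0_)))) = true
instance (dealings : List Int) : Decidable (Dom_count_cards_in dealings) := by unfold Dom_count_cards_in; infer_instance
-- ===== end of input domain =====

-- B scores each distinct card value once via a frequency table instead of A's per-card loop (alternative decomposition, same cost).


-- ===== PORT A =====
def count_cards_in (dealings : List Int) : Int :=
  dealings.foldl
    (fun running_count card =>
      if card < 6 ∧ card > 1 then running_count + 1
      else if card > 10 then running_count - 1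
      else running_count)
    0

-- ===== PORT B =====
def count_cards_in_alt (dealings : List Int) : Int :=
  let counts : PySem.Dict Int Int :=
    dealings.foldl (fun d card => d.insert card (d.getD card 0 + 1)) PySem.Dict.empty
  counts.items.foldl
    (fun running_count vc =>
      if 1 < vc.1 ∧ vc.1 < 6 then running_count + vc.2
      else if vc.1 > 10 then running_count - vc.2
      else running_count)
    0

-- ===== PRECONDITION & SPEC =====
def Spec_count_cards_in (dealings : List Int) (out : Int) : Prop := out = count_cards_in_alt dealings
instance (dealings : List Int) (out : Int) : Decidable (Spec_count_cards_in dealings out) := by unfold Spec_count_cards_in; infer_instance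

-- ===== CLAIM (what is proved, stated in full; the proofs are below) =====
def Claim_equal_count_cards_in : Prop := ∀ (dealings : List Int), Dom_count_cards_in dealings → Spec_count_cards_in dealings (count_cards_in dealings)

-- ===== LEMMAS AND PROOFS =====

-- per-card weight
def pvW (x : Int) : Int := if x < 6 ∧ x > 1 then 1 else if x > 10 then -1 else 0

theorem pvA_foldl (xs : List Int) (acc : Int) :
    xs.foldl (fun r card => if card < 6 ∧ card > 1 then r + 1
      else if card > 10 then r - 1 else r) acc = acc + (xs.map pvW).sum := by
  induction xs generalizing acc with
  | nil => simp
  | cons x xs ih =>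
    simp only [List.foldl_cons, List.map_cons, List.sum_cons, ih, pvW]
    split_ifs <;> ring

theorem pvB_foldl (l : List (Int × Int)) (acc : Int) :
    l.foldl (fun r vc => if 1 < vc.1 ∧ vc.1 < 6 then r + vc.2
      else if vc.1 > 10 then r - vc.2 else r) acc
      = acc + (l.map (fun vc => pvW vc.1 * vc.2)).sum := by
  induction l generalizing acc with
  | nil => simp
  | cons p l ih =>
    simp only [List.foldl_cons, List.map_cons, List.sum_cons, ih, pvW]
    split_ifs <;> omega

theorem pvSplit (k : Int) (xs : List Int) :
    (xs.map pvW).sum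
      = pvW k * (xs.count k : Int) + ((xs.filter (fun x => x ≠ k)).map pvW).sum := by
  induction xs with
  | nil => simp
  | cons x xs ih =>
    by_cases hx : x = k
    · subst hx
      simp [List.count_cons, List.filter_cons, ih]
      push_cast
      ring
    · simp [List.count_cons, hx, List.filter_cons, ih]
      ring

theorem pvKey (keys : List Int) (xs : List Int) (hnd : keys.Nodup)
    (hcov : ∀ x ∈ xs, x ∈ keys) :
    (keys.map (fun k => pvW k * (xs.count k : Int))).sum = (xs.map pvW).sum := by
  induction keys generalizing xs with
  | nil =>
    have : xs = [] := by
      cases xs with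
      | nil => rfl
      | cons a l => exact absurd (hcov a (by simp)) (by simp)
    simp [this]
  | cons k rest ih =>
    have hnd' : rest.Nodup := hnd.of_cons
    have hk : k ∉ rest := by
      have := List.nodup_cons.mp hnd; exact this.1
    set ys := xs.filter (fun x => x ≠ k) with hys
    have hcount : ∀ k' ∈ rest, (ys.count k' : Int) = (xs.count k' : Int) := by
      intro k' hk'
      have hne : k' ≠ k := fun h => hk (h ▸ hk')
      simp [hys, List.count_filter, hne]
    have hcov' : ∀ x ∈ ys, x ∈ rest := by
      intro x hx
      have hx' := List.mem_filter.mp hx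
      have : x ≠ k := by simpa using hx'.2
      have := hcov x hx'.1
      simp at this
      tauto
    have hmaps : rest.map (fun k' => pvW k' * (xs.count k' : Int))
        = rest.map (fun k' => pvW k' * (ys.count k' : Int)) :=
      List.map_congr_left (fun k' hk' => by rw [hcount k' hk'])
    calc (((k :: rest)).map (fun k' => pvW k' * (xs.count k' : Int))).sum
        = pvW k * (xs.count k : Int)
          + (rest.map (fun k' => pvW k' * (xs.count k' : Int))).sum := by simp
      _ = pvW k * (xs.count k : Int) + (ys.map pvW).sum := by
          rw [hmaps, ih ys hnd' hcov']
      _ = (xs.map pvW).sum := (pvSplit k xs).symm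

theorem pvA_eq (xs : List Int) : count_cards_in xs = (xs.map pvW).sum := by
  simpa using pvA_foldl xs 0

theorem pvB_eq (xs : List Int) :
    count_cards_in_alt xs
      = ((PySem.Set.ofList xs).map (fun k => pvW k * (xs.count k : Int))).sum := by
  unfold count_cards_in_alt
  rw [PySem.Dict.foldl_insert_getD_add_one_eq_counter, pvB_foldl,
    PySem.Dict.items_counter]
  simp [List.map_map]
  rfl

-- ===== VERDICT (by name: the statement is the Claim_ definition above) =====
theorem count_cards_in_spec : Claim_equal_count_cards_in := by
  intro xs _
  show count_cards_in xs = count_cards_in_alt xs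
  rw [pvA_eq, pvB_eq]
  exact (pvKey (PySem.Set.ofList xs) xs (PySem.Set.nodup_ofList xs)
    (fun x hx => (PySem.Set.mem_ofList xs x).mpr hx)).symm
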